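-- pv_equiv track=rewrite | github.com/coryshain/pyModelBlocks | mb/util/constit_eval.py | get_seg
-- ===== SOURCE A (Python) =====
-- def get_seg(wrds):
--   out = []
--   chars = ' '.join(wrds)
--   seg = True
--   for i in range(len(chars)):
--     if (chars[i]) == ' ':
--       seg = True
--     else:
--       out.append(int(seg))
--       seg = False
--   return out
-- ===== SOURCE B (Python) =====
-- def get_seg(wrds):
--   out = []
--   for tok in ' '.join(wrds).split(' '):
--     if tok:
--       out.append(1)
--       out.extend([0] * (len(tok) - 1))
--   return out
-- ===== Notes on version B (the rewrite author's own statement) =====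
-- stated objective: alternative
-- what changed: Replaced the char-by-char scan with a running segment flag by tokenizing the joined string on ' ' and emitting 1 followed by len(tok)-1 zeros per non-empty token.
import Mathlib
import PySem

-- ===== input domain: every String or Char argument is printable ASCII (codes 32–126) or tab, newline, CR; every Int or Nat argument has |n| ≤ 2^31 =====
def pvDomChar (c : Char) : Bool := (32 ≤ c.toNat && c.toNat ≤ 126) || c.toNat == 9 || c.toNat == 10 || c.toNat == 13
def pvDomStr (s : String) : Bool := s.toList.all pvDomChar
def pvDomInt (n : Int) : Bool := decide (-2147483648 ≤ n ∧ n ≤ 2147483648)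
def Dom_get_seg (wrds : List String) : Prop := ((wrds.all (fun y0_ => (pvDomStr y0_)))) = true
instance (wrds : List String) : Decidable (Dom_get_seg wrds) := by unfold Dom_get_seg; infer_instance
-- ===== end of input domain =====

-- B tokenizes the joined string on ' ' and emits a 1 plus zeros per non-empty token,
-- instead of A's char-by-char scan with a running segment flag (alternative decomposition, same cost).

-- ===== PORT A =====
def get_seg (wrds : List String) : List Int :=
  let chars := PySem.Str.join " " wrds
  ((PySem.List.pyRange 0 (PySem.Str.len chars) 1).foldl
    (fun (st : List Int × Bool) i =>
      if PySem.List.pyGetD chars.toList i ' ' = ' ' then (st.1, true)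
      else (st.1 ++ [if st.2 then (1 : Int) else 0], false))
    ([], true)).1

-- ===== PORT B =====
def get_seg_alt (wrds : List String) : List Int :=
  let toks := (PySem.Str.split? (PySem.Str.join " " wrds) " ").getD []
  toks.foldl
    (fun out t =>
      if t = "" then out
      else out ++ ((1 : Int) :: List.replicate (PySem.Str.len t - 1).toNat 0))
    []

-- ===== PRECONDITION & SPEC =====
def Spec_get_seg (wrds : List String) (out : List Int) : Prop := out = get_seg_alt wrds
instance (wrds : List String) (out : List Int) : Decidable (Spec_get_seg wrds out) := by unfold Spec_get_seg; infer_instance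

-- ===== CLAIM (what is proved, stated in full; the proofs are below) =====
def Claim_equal_get_seg : Prop := ∀ (wrds : List String), Dom_get_seg wrds → Spec_get_seg wrds (get_seg wrds)

-- ===== LEMMAS AND PROOFS =====

/-- Reference recursion: A's scan of the character list with its segment flag. -/
def scanSeg : List Char → Bool → List Int
  | [], _ => []
  | c :: cs, seg =>
    if c = ' ' then scanSeg cs true
    else (if seg then (1 : Int) else 0) :: scanSeg cs false

/-- Accumulator-free recursion equivalent to splitOn on the single separator ' '. -/
def mySplit : List Char → List Char → List (List Char)
  | cur, [] => [cur]
  | cur, c :: rest => if c = ' ' then cur :: mySplit [] rest else mySplit (cur ++ [c]) rest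

theorem scanSeg_foldl (cs : List Char) (acc : List Int) (seg : Bool) :
    (cs.foldl
      (fun (st : List Int × Bool) c =>
        if c = ' ' then (st.1, true)
        else (st.1 ++ [if st.2 then (1 : Int) else 0], false))
      (acc, seg)).1 = acc ++ scanSeg cs seg := by
  induction cs generalizing acc seg with
  | nil => simp [scanSeg]
  | cons c cs ih =>
    by_cases h : c = ' ' <;> simp [scanSeg, h, ih]

theorem splitOn_go_eq (fuel : Nat) (l cur : List Char) (acc : List (List Char))
    (h : l.length ≤ fuel) :
    PySem.Chars.splitOn.go [' '] fuel l cur acc = acc.reverse ++ mySplit cur.reverse l := by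
  induction fuel generalizing l cur acc with
  | zero =>
    have : l = [] := List.length_eq_zero_iff.mp (Nat.le_zero.mp h)
    subst this
    simp [PySem.Chars.splitOn.go, mySplit]
  | succ fuel ih =>
    cases l with
    | nil => simp [PySem.Chars.splitOn.go, mySplit]
    | cons c rest =>
      by_cases hc : c = ' '
      · subst hc
        have hp : [' '].isPrefixOf (' ' :: rest) = true := by simp [List.isPrefixOf]
        simp only [PySem.Chars.splitOn.go, hp, if_pos]
        rw [show List.drop [' '].length (' ' :: rest) = rest from rfl]
        rw [ih rest [] (cur.reverse :: acc) (Nat.le_of_succ_le_succ (by simpa using h))]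
        simp [mySplit]
      · have hp : [' '].isPrefixOf (c :: rest) = false := by
          simp [List.isPrefixOf]
          exact fun hsp => hc hsp.symm
        simp only [PySem.Chars.splitOn.go, hp, Bool.false_eq_true, if_false]
        rw [ih rest (c :: cur) acc (Nat.le_of_succ_le_succ (by simpa using h))]
        simp [mySplit, hc]

theorem splitOn_eq_mySplit (cs : List Char) :
    PySem.Chars.splitOn cs [' '] = mySplit [] cs := by
  unfold PySem.Chars.splitOn
  rw [splitOn_go_eq (cs.length + 1) cs [] [] (Nat.le_succ _)]
  simp

/-- One token's contribution in B. -/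
def pat (t : List Char) : List Int :=
  if t = [] then [] else (1 : Int) :: List.replicate (t.length - 1) 0

theorem flatMap_mySplit (cs cur : List Char) :
    (mySplit cur cs).flatMap pat =
      pat cur ++ scanSeg cs (cur == []) := by
  induction cs generalizing cur with
  | nil => simp [mySplit, scanSeg]
  | cons c rest ih =>
    by_cases hc : c = ' '
    · subst hc; simp [mySplit, scanSeg, ih, pat]
    · simp only [mySplit, if_neg hc, scanSeg, ih (cur ++ [c])]
      cases cur with
      | nil => simp [pat]
      | cons d ds =>
        simp only [pat, List.cons_append, reduceCtorEq, List.length_append,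
          List.length_cons, List.length_nil, beq_iff_eq]
        simp [List.replicate_succ', List.append_assoc]

theorem foldl_emit (ts : List (List Char)) (acc : List Int) :
    (ts.map String.ofList).foldl
      (fun out t =>
        if t = "" then out
        else out ++ ((1 : Int) :: List.replicate (((t.toList.length : Int)) - 1).toNat 0))
      acc = acc ++ ts.flatMap pat := by
  induction ts generalizing acc with
  | nil => simp
  | cons t ts ih =>
    cases t with
    | nil =>
      simp only [List.map_cons, List.foldl_cons, List.flatMap_cons]
      rw [ih]
      simp [pat]
    | cons d ds =>
      have hne : String.ofList (d :: ds) ≠ "" := by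
        simp [← String.toList_inj]
      simp only [List.map_cons, List.foldl_cons, if_neg hne, ih, List.flatMap_cons]
      have hlen : ((((String.ofList (d :: ds)).toList.length : Int)) - 1).toNat = ds.length := by
        simp
      rw [hlen]
      simp [pat]

-- ===== VERDICT (by name: the statement is the Claim_ definition above) =====
theorem get_seg_spec : Claim_equal_get_seg := by
  intro wrds _
  unfold Spec_get_seg get_seg get_seg_alt
  set s := PySem.Str.join " " wrds with hs
  simp only [PySem.Str.len_eq]
  rw [PySem.List.foldl_pyRange_zero_pyGetD' s.toList ' '
    (fun (st : List Int × Bool) c =>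
      if c = ' ' then (st.1, true)
      else (st.1 ++ [if st.2 then (1 : Int) else 0], false)) ([], true)]
  rw [scanSeg_foldl]
  have hsplit : PySem.Str.split? s " " = some ((PySem.Chars.splitOn s.toList [' ']).map String.ofList) := by
    simp [PySem.Str.split?, PySem.Chars.split?]
  rw [hsplit]
  simp only [Option.getD_some, splitOn_eq_mySplit]
  rw [foldl_emit, flatMap_mySplit]
  simp [pat]
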